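-- pv_equiv track=rewrite | github.com/2021-Dev-Study/Algorithm | Baekjoon/문자열/5622_다이얼/red-Pen9uin.py | get_dial_time
-- ===== SOURCE A (Python) =====
-- def get_dial_time(word: str) ->list:
--     # 해쉬 테이블과 비슷한 느낌으로,
--     # 기존에 생각했던 건 각 다이얼마다 달린 알파벳을 dict 형태로 정리,
--     # 검색에 있어서 일일히 비교하는 방식.
--     # 다만 너무 오랜 시간이 걸릴 것 같아 solution을 몇 검색했고, 다른 형태로 전환하기로 결정했다.
--     string = word.rstrip("\n")
--     num_time = list()
--     # index[0] -> dial no.2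
--     dial = ['A', 'D', 'G', 'J', 'M', 'P', 'T', 'W']
--
--     for alph in string:
--         for i in reversed(range(0, len(dial))):
--             if dial[i] <= alph:
--                 num_time.append(i + 1 + 2)
--                 break
--     return num_time
-- ===== SOURCE B (Python) =====
-- def get_dial_time(word: str) -> list:
--     # Hand-rolled binary search over the sorted bucket boundaries (no inner
--     # linear scan); lo ends as the number of boundaries <= c, so the dial
--     # number is lo + 2, and lo == 0 means the char is below 'A' and is skipped.
--     s = word.rstrip("\n")
--     dial = ['A', 'D', 'G', 'J', 'M', 'P', 'T', 'W']
--     out = []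
--     for c in s:
--         lo, hi = 0, len(dial)
--         while lo < hi:
--             mid = (lo + hi) // 2
--             if c < dial[mid]:
--                 hi = mid
--             else:
--                 lo = mid + 1
--         if lo:
--             out.append(lo + 2)
--     return out
-- ===== Notes on version B (the rewrite author's own statement) =====
-- stated objective: alternative
-- what changed: Replaced A's per-character reverse linear scan over the 8 dial boundaries with a hand-rolled binary search (bisect_right) on the same sorted boundary list, appending lo+2 when lo>0.
import Mathlib
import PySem

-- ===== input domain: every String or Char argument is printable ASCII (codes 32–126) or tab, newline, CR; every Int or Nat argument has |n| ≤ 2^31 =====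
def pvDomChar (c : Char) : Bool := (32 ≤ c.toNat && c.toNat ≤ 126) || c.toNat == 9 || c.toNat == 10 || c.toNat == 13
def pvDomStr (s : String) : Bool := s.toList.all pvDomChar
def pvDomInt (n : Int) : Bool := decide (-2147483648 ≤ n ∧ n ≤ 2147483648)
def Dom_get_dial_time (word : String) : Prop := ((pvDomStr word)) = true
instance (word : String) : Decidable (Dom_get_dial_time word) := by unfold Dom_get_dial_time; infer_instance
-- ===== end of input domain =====

-- B replaces A's reverse linear scan of the dial boundaries by a hand-rolled
-- binary search (bisect_right) over the same sorted boundary list; objective: alternative.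

-- ===== PORT A =====
-- inner loop: `for i in reversed(range(0, len(dial))): if dial[i] <= alph: append(i+1+2); break`
def pvInnerA (dial : List Char) (c : Char) : List Int → Option Int
  | [] => none
  | i :: rest =>
      match PySem.List.pyGet? dial i with
      | some d => if d ≤ c then some (i + 1 + 2) else pvInnerA dial c rest
      | none => none  -- unreachable: i is drawn from range(0, len(dial))

def get_dial_time (word : String) : List Int :=
  -- word.rstrip("\n"): drop trailing '\n' characters (hand port, exact)
  let string := (word.toList.reverse.dropWhile (fun ch => ch == '\n')).reverse
  let dial : List Char := ['A', 'D', 'G', 'J', 'M', 'P', 'T', 'W']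
  string.foldl (fun num_time alph =>
      match pvInnerA dial alph ((PySem.List.pyRange 0 (Int.ofNat dial.length) 1).reverse) with
      | some v => num_time ++ [v]
      | none => num_time) []

-- ===== PORT B =====
-- `while lo < hi: mid = (lo+hi)//2; if c < dial[mid]: hi = mid else: lo = mid+1`
-- (fuel bounds the iteration count; fuel = len(dial) is never exhausted)
def pvBisect (dial : List Char) (c : Char) : Int → Int → Nat → Int
  | lo, _, 0 => lo
  | lo, hi, fuel + 1 =>
      if lo < hi then
        let mid := PySem.Int.floordiv (lo + hi) 2
        match PySem.List.pyGet? dial mid with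
        | some d => if c < d then pvBisect dial c lo mid fuel else pvBisect dial c (mid + 1) hi fuel
        | none => lo  -- unreachable: 0 ≤ lo ≤ mid < hi ≤ len(dial)
      else lo

def get_dial_time_alt (word : String) : List Int :=
  let s := (word.toList.reverse.dropWhile (fun ch => ch == '\n')).reverse
  let dial : List Char := ['A', 'D', 'G', 'J', 'M', 'P', 'T', 'W']
  s.foldl (fun out c =>
      let lo := pvBisect dial c 0 (Int.ofNat dial.length) dial.length
      if lo ≠ 0 then out ++ [lo + 2] else out) []

-- ===== PRECONDITION & SPEC =====
def Spec_get_dial_time (word : String) (out : List Int) : Prop := out = get_dial_time_alt word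
instance (word : String) (out : List Int) : Decidable (Spec_get_dial_time word out) := by unfold Spec_get_dial_time; infer_instance

-- ===== CLAIM (what is proved, stated in full; the proofs are below) =====
def Claim_equal_get_dial_time : Prop := ∀ (word : String), Dom_get_dial_time word → Spec_get_dial_time word (get_dial_time word)

-- ===== LEMMAS AND PROOFS =====

-- the per-character step of each port, as an Option Int
def pvStepA (c : Char) : Option Int :=
  pvInnerA ['A', 'D', 'G', 'J', 'M', 'P', 'T', 'W'] c
    ((PySem.List.pyRange 0 (Int.ofNat (['A', 'D', 'G', 'J', 'M', 'P', 'T', 'W'] : List Char).length) 1).reverse)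

def pvStepB (c : Char) : Option Int :=
  let lo := pvBisect ['A', 'D', 'G', 'J', 'M', 'P', 'T', 'W'] c 0
    (Int.ofNat (['A', 'D', 'G', 'J', 'M', 'P', 'T', 'W'] : List Char).length)
    (['A', 'D', 'G', 'J', 'M', 'P', 'T', 'W'] : List Char).length
  if lo ≠ 0 then some (lo + 2) else none

theorem pvStep_eq_of_lt (c : Char) (h : c.toNat < 127) : pvStepA c = pvStepB c := by
  have hall : ∀ n, n < 127 → pvStepA (Char.ofNat n) = pvStepB (Char.ofNat n) := by decide
  have := hall c.toNat h
  rwa [Char.ofNat_toNat] at this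

theorem pvFold_eq (cs : List Char) (h : ∀ c ∈ cs, pvDomChar c = true) (acc : List Int) :
    cs.foldl (fun num_time alph =>
        match pvStepA alph with
        | some v => num_time ++ [v]
        | none => num_time) acc
      = cs.foldl (fun out c =>
          match pvStepB c with
          | some v => out ++ [v]
          | none => out) acc := by
  induction cs generalizing acc with
  | nil => rfl
  | cons c rest ih =>
      have hc : pvDomChar c = true := h c (List.mem_cons_self ..)
      have hlt : c.toNat < 127 := by
        simp only [pvDomChar, Bool.or_eq_true, Bool.and_eq_true, decide_eq_true_eq,
          beq_iff_eq] at hc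
        omega
      have hrest : ∀ x ∈ rest, pvDomChar x = true := fun x hx => h x (List.mem_cons_of_mem _ hx)
      simp only [List.foldl_cons, pvStep_eq_of_lt c hlt]
      exact ih hrest _

-- ===== VERDICT (by name: the statement is the Claim_ definition above) =====
theorem get_dial_time_spec : Claim_equal_get_dial_time := by
  intro word hdom
  unfold Spec_get_dial_time get_dial_time get_dial_time_alt
  have hall : ∀ c ∈ (word.toList.reverse.dropWhile (fun ch => ch == '\n')).reverse,
      pvDomChar c = true := by
    intro c hc
    have hmem : c ∈ word.toList := by
      have := List.mem_reverse.mp hc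
      exact List.mem_reverse.mp ((List.dropWhile_sublist _).subset this)
    unfold Dom_get_dial_time pvDomStr at hdom
    exact List.all_eq_true.mp hdom c hmem
  have h1 : (fun (num_time : List Int) (alph : Char) =>
      match pvInnerA ['A', 'D', 'G', 'J', 'M', 'P', 'T', 'W'] alph
          ((PySem.List.pyRange 0 (Int.ofNat (['A', 'D', 'G', 'J', 'M', 'P', 'T', 'W'] : List Char).length) 1).reverse) with
      | some v => num_time ++ [v]
      | none => num_time)
    = (fun (num_time : List Int) (alph : Char) =>
      match pvStepA alph with
      | some v => num_time ++ [v]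
      | none => num_time) := rfl
  have h2 : (fun (out : List Int) (c : Char) =>
      let lo := pvBisect ['A', 'D', 'G', 'J', 'M', 'P', 'T', 'W'] c 0
        (Int.ofNat (['A', 'D', 'G', 'J', 'M', 'P', 'T', 'W'] : List Char).length)
        (['A', 'D', 'G', 'J', 'M', 'P', 'T', 'W'] : List Char).length
      if lo ≠ 0 then out ++ [lo + 2] else out)
    = (fun (out : List Int) (c : Char) =>
      match pvStepB c with
      | some v => out ++ [v]
      | none => out) := by
    funext out c
    by_cases hlo : pvBisect ['A', 'D', 'G', 'J', 'M', 'P', 'T', 'W'] c 0 8 8 = 0 <;>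
      simp [pvStepB, hlo]
  simp only [h1, h2]
  exact pvFold_eq _ hall []
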